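-- pv_equiv track=rewrite | github.com/hogwild/WordsExtraction | main_video.py | sort_bboxes
-- ===== SOURCE A (Python) =====
-- def sort_bboxes(bboxes, MID):
--     sorted_bboxes = {}
--     sorted_bboxes['up'] = []
--     sorted_bboxes['down'] = []
--     for box in bboxes:
--         if box[3] <= MID:
--             sorted_bboxes['up'].append(box)
--         else:
--             sorted_bboxes['down'].append(box)
--     sorted_bboxes['up'].sort(key=lambda x:x[0])
--     sorted_bboxes['down'].sort(key=lambda x:x[0])
--     return sorted_bboxes
-- ===== SOURCE B (Python) =====
-- def sort_bboxes(bboxes, MID):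
--     # Sort once up front (stable), then partition in a single pass.
--     sorted_bboxes = {'up': [], 'down': []}
--     for box in sorted(bboxes, key=lambda x: x[0]):
--         sorted_bboxes['up' if box[3] <= MID else 'down'].append(box)
--     return sorted_bboxes
-- ===== Notes on version B (the rewrite author's own statement) =====
-- stated objective: alternative
-- what changed: A partitions first and then sorts each of the two groups separately; B sorts the whole list once (stability preserves tie order) and partitions the already-sorted list in a single pass into the dict.
import Mathlib
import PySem

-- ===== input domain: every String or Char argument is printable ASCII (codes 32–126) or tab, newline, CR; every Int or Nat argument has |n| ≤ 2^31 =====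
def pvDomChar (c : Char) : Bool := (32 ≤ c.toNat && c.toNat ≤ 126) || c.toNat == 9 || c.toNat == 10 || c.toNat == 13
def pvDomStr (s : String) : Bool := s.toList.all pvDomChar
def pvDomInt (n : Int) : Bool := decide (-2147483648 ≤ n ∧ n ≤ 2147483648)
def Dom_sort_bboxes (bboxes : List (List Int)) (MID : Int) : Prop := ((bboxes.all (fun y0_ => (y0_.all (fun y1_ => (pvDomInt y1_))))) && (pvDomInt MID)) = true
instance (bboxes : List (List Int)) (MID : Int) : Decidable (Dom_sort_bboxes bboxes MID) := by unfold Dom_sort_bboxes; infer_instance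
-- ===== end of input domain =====

-- B changes the decomposition: one stable sort up front, then a single partitioning pass
-- (A partitions first, then sorts each group); same cost, equivalence rests on sort stability.
-- ===== PORT A =====
-- box[3] and the sort key x[0]: under Pre_ every box has length ≥ 4, so the pyGetD defaults are never taken.
def sort_bboxes (bboxes : List (List Int)) (MID : Int) : List (String × List (List Int)) :=
  let d : PySem.Dict String (List (List Int)) := PySem.Dict.empty
  let d := d.insert "up" []
  let d := d.insert "down" []
  let d := bboxes.foldl (fun d box =>
    if PySem.List.pyGetD box 3 0 ≤ MID then d.modify "up" [] (fun l => l ++ [box])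
    else d.modify "down" [] (fun l => l ++ [box])) d
  let d := d.modify "up" [] (fun l => PySem.List.sorted l (fun x => PySem.List.pyGetD x 0 0))
  let d := d.modify "down" [] (fun l => PySem.List.sorted l (fun x => PySem.List.pyGetD x 0 0))
  d.items

-- ===== PORT B =====
def sort_bboxes_alt (bboxes : List (List Int)) (MID : Int) : List (String × List (List Int)) :=
  let d : PySem.Dict String (List (List Int)) := PySem.Dict.empty
  let d := d.insert "up" []
  let d := d.insert "down" []
  let d := (PySem.List.sorted bboxes (fun x => PySem.List.pyGetD x 0 0)).foldl (fun d box =>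
    d.modify (if PySem.List.pyGetD box 3 0 ≤ MID then "up" else "down") [] (fun l => l ++ [box])) d
  d.items

-- ===== PRECONDITION & SPEC =====
-- Pre_ excludes boxes shorter than 4 entries: there Python A raises IndexError on box[3] (or on the
-- sort key x[0]); B raises there as well.
def Pre_sort_bboxes (bboxes : List (List Int)) (MID : Int) : Prop :=
  ∀ box ∈ bboxes, 4 ≤ box.length
instance (bboxes : List (List Int)) (MID : Int) : Decidable (Pre_sort_bboxes bboxes MID) := by unfold Pre_sort_bboxes; infer_instance

def pvWitness_sort_bboxes : List (List Int) × Int := ([[1, 2, 3, 4], [0, 1, 2, 9], [1, 0, 0, 2]], 5)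

def Spec_sort_bboxes (bboxes : List (List Int)) (MID : Int) (out : List (String × List (List Int))) : Prop := out = sort_bboxes_alt bboxes MID
instance (bboxes : List (List Int)) (MID : Int) (out : List (String × List (List Int))) : Decidable (Spec_sort_bboxes bboxes MID out) := by unfold Spec_sort_bboxes; infer_instance

-- ===== CLAIM (what is proved, stated in full; the proofs are below) =====
def Claim_equal_sort_bboxes : Prop := ∀ (bboxes : List (List Int)) (MID : Int), Dom_sort_bboxes bboxes MID → Pre_sort_bboxes bboxes MID → Spec_sort_bboxes bboxes MID (sort_bboxes bboxes MID)

-- ===== LEMMAS AND PROOFS =====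

-- inserting an element whose key is strictly below every key in the list prepends it
theorem pv_ib_front {α : Type} (key : α → Int) (x : α) (l : List α)
    (h : ∀ z ∈ l, key x < key z) :
    PySem.List.insertBy (fun a b => decide (key a < key b)) x l = x :: l := by
  cases l with
  | nil => simp [PySem.List.insertBy]
  | cons y ys => simp [PySem.List.insertBy, h y (by simp)]

-- stable insertion into a key-sorted list commutes with filtering
theorem pv_filter_insertBy {α : Type} (key : α → Int) (p : α → Bool) (x : α) :
    ∀ acc : List α, acc.Pairwise (fun a b => key a ≤ key b) →
    (PySem.List.insertBy (fun a b => decide (key a < key b)) x acc).filter p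
      = if p x then PySem.List.insertBy (fun a b => decide (key a < key b)) x (acc.filter p)
        else acc.filter p := by
  intro acc
  induction acc with
  | nil =>
    intro _
    by_cases hpx : p x = true <;> simp [PySem.List.insertBy, hpx]
  | cons y ys ih =>
    intro hpw
    have hy : ∀ z ∈ ys, key y ≤ key z := (List.pairwise_cons.mp hpw).1
    have hys := (List.pairwise_cons.mp hpw).2
    by_cases hpx : p x = true
    · by_cases hb : key x < key y
      · simp only [PySem.List.insertBy, hb, decide_true, if_true,
          List.filter_cons_of_pos hpx, hpx]
        by_cases hpy : p y = true
        · rw [List.filter_cons_of_pos hpy, pv_ib_front key x (y :: ys.filter p)]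
          intro z hz
          rcases List.mem_cons.mp hz with h | h
          · exact h ▸ hb
          · have := hy z (List.mem_of_mem_filter h); omega
        · rw [List.filter_cons_of_neg (by simp [hpy]),
            pv_ib_front key x (ys.filter p)
              (by intro z hz; have := hy z (List.mem_of_mem_filter hz); omega)]
      · simp only [PySem.List.insertBy, hb, decide_false, Bool.false_eq_true, if_false]
        by_cases hpy : p y = true
        · rw [List.filter_cons_of_pos hpy, List.filter_cons_of_pos hpy, ih hys, if_pos hpx,
            if_pos hpx]
          simp [PySem.List.insertBy, hb]
        · rw [List.filter_cons_of_neg (by simp [hpy]), List.filter_cons_of_neg (by simp [hpy]),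
            ih hys, if_pos hpx]
    · rw [if_neg hpx]
      by_cases hb : key x < key y
      · simp only [PySem.List.insertBy, hb, decide_true, if_true]
        rw [List.filter_cons_of_neg (by simp [hpx])]
      · simp only [PySem.List.insertBy, hb, decide_false, Bool.false_eq_true, if_false]
        by_cases hpy : p y = true
        · rw [List.filter_cons_of_pos hpy, List.filter_cons_of_pos hpy, ih hys, if_neg hpx]
        · rw [List.filter_cons_of_neg (by simp [hpy]), List.filter_cons_of_neg (by simp [hpy]),
            ih hys, if_neg hpx]

-- stability: filtering after the stable sort = sorting the filtered list
theorem pv_filter_sorted (key : List Int → Int) (p : List Int → Bool) (xs : List (List Int)) :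
    (PySem.List.sorted xs key).filter p = PySem.List.sorted (xs.filter p) key := by
  induction xs using List.reverseRecOn with
  | nil => rfl
  | append_singleton xs x ih =>
    have hstep : ∀ ys : List (List Int), PySem.List.sorted (ys ++ [x]) key
        = PySem.List.insertBy (fun a b => decide (key a < key b)) x (PySem.List.sorted ys key) := by
      intro ys; simp [PySem.List.sorted, List.foldl_append]
    rw [hstep, pv_filter_insertBy key p x _ (PySem.List.sorted_pairwise xs key), ih]
    by_cases hpx : p x = true
    · simp [hpx, List.filter_append, hstep]
    · simp [hpx, List.filter_append, List.filter]

theorem pv_modify_up (u d : List (List Int)) (f : List (List Int) → List (List Int)) :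
    (PySem.Dict.mk [("up", u), ("down", d)]).modify "up" [] f
      = PySem.Dict.mk [("up", f u), ("down", d)] := by
  simp [PySem.Dict.modify, PySem.Dict.insert, PySem.Dict.getD, PySem.Dict.get?, PySem.Dict.contains]

theorem pv_modify_down (u d : List (List Int)) (f : List (List Int) → List (List Int)) :
    (PySem.Dict.mk [("up", u), ("down", d)]).modify "down" [] f
      = PySem.Dict.mk [("up", u), ("down", f d)] := by
  simp [PySem.Dict.modify, PySem.Dict.insert, PySem.Dict.getD, PySem.Dict.get?, PySem.Dict.contains]

-- A's partition loop, characterised by filters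
theorem pv_loopA (MID : Int) (l : List (List Int)) :
    ∀ u d : List (List Int),
    l.foldl (fun dd box =>
        if PySem.List.pyGetD box 3 0 ≤ MID then dd.modify "up" [] (fun l => l ++ [box])
        else dd.modify "down" [] (fun l => l ++ [box]))
      (PySem.Dict.mk [("up", u), ("down", d)])
    = PySem.Dict.mk [("up", u ++ l.filter (fun b => decide (PySem.List.pyGetD b 3 0 ≤ MID))),
                     ("down", d ++ l.filter (fun b => !decide (PySem.List.pyGetD b 3 0 ≤ MID)))] := by
  induction l with
  | nil => intro u d; simp
  | cons x xs ih =>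
    intro u d
    by_cases hx : PySem.List.pyGetD x 3 0 ≤ MID
    · rw [List.foldl_cons, if_pos hx, pv_modify_up, ih,
        List.filter_cons_of_pos (by simpa using hx),
        List.filter_cons_of_neg (by simpa using hx)]
      simp
    · rw [List.foldl_cons, if_neg hx, pv_modify_down, ih,
        List.filter_cons_of_neg (by simpa using hx),
        List.filter_cons_of_pos (by simpa using hx)]
      simp

-- B's partition loop, characterised by the same filters
theorem pv_loopB (MID : Int) (l : List (List Int)) :
    ∀ u d : List (List Int),
    l.foldl (fun dd box =>
        dd.modify (if PySem.List.pyGetD box 3 0 ≤ MID then "up" else "down") [] (fun l => l ++ [box]))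
      (PySem.Dict.mk [("up", u), ("down", d)])
    = PySem.Dict.mk [("up", u ++ l.filter (fun b => decide (PySem.List.pyGetD b 3 0 ≤ MID))),
                     ("down", d ++ l.filter (fun b => !decide (PySem.List.pyGetD b 3 0 ≤ MID)))] := by
  induction l with
  | nil => intro u d; simp
  | cons x xs ih =>
    intro u d
    by_cases hx : PySem.List.pyGetD x 3 0 ≤ MID
    · rw [List.foldl_cons, if_pos hx, pv_modify_up, ih,
        List.filter_cons_of_pos (by simpa using hx),
        List.filter_cons_of_neg (by simpa using hx)]
      simp
    · rw [List.foldl_cons, if_neg hx, pv_modify_down, ih,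
        List.filter_cons_of_neg (by simpa using hx),
        List.filter_cons_of_pos (by simpa using hx)]
      simp

-- ===== VERDICT (by name: the statement is the Claim_ definition above) =====
theorem sort_bboxes_spec : Claim_equal_sort_bboxes := by
  intro bboxes MID _ _
  unfold Spec_sort_bboxes sort_bboxes sort_bboxes_alt
  have hinit : ((PySem.Dict.empty.insert "up" ([] : List (List Int))).insert "down" [])
      = PySem.Dict.mk [("up", []), ("down", [])] := rfl
  simp only []
  rw [hinit, pv_loopA, pv_loopB, pv_modify_up, pv_modify_down]
  rw [pv_filter_sorted (fun x => PySem.List.pyGetD x 0 0)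
        (fun b => decide (PySem.List.pyGetD b 3 0 ≤ MID)) bboxes,
      pv_filter_sorted (fun x => PySem.List.pyGetD x 0 0)
        (fun b => !decide (PySem.List.pyGetD b 3 0 ≤ MID)) bboxes]
  simp
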